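-- pv_equiv track=rewrite | github.com/AastikRajan/Astro-brain | vedic_engine/timing/rare_dashas.py | _get_padanadhamsha_sequence
-- ===== SOURCE A (Python) =====
-- from typing import Dict, Any, List, Optional, Tuple
--
-- _MODALITY = {
--     0: 0, 1: 1, 2: 2, 3: 0, 4: 1, 5: 2,
--     6: 0, 7: 1, 8: 2, 9: 0, 10: 1, 11: 2,
-- }
--
-- def _is_odd_sign(sign: int) -> bool:
--     return sign % 2 == 0  # Aries=0 is Odd, Taurus=1 is Even
--
-- _PADANADHAMSHA_SEQUENCES: Dict[str, List[int]] = {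
--     # 1. Odd + Movable (Aries, Libra): Standard direct sequence
--     "ODD_MOVABLE":  list(range(12)),  # 0,1,2,...,11
--
--     # 2. Even + Movable (Cancer, Capricorn): Standard reverse sequence
--     "EVEN_MOVABLE": list(range(11, -1, -1)),  # 11,10,9,...,0
--
--     # 3. Odd + Fixed (Leo, Aquarius): Every 6th sign forward
--     "ODD_FIXED_LEO":     [4, 9, 2, 7, 0, 5, 10, 3, 8, 1, 6, 11],
--     "ODD_FIXED_AQU":     [10, 3, 8, 1, 6, 11, 4, 9, 2, 7, 0, 5],
--
--     # 4. Even + Fixed (Taurus, Scorpio): Every 6th sign reverse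
--     "EVEN_FIXED_TAU":    [1, 8, 3, 10, 5, 0, 7, 2, 9, 4, 11, 6],
--     "EVEN_FIXED_SCO":    [7, 2, 9, 4, 11, 6, 1, 8, 3, 10, 5, 0],
--
--     # 5. Odd + Dual (Gemini, Sagittarius): Trinal jump forward (1,5,9)
--     "ODD_DUAL_GEM":      [2, 6, 10, 3, 7, 11, 4, 8, 0, 5, 9, 1],
--     "ODD_DUAL_SAG":      [8, 0, 4, 9, 1, 5, 10, 2, 6, 11, 3, 7],
--
--     # 6. Even + Dual (Virgo, Pisces): Trinal jump reverse (1,5,9)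
--     "EVEN_DUAL_VIR":     [5, 1, 9, 4, 0, 8, 3, 11, 7, 2, 10, 6],
--     "EVEN_DUAL_PIS":     [11, 7, 3, 10, 6, 2, 9, 5, 1, 8, 4, 0],
-- }
--
-- def _get_padanadhamsha_sequence(start_sign: int) -> List[int]:
--     """Return the 12-sign sequence for the given Padanadhamsha starting sign."""
--     mod = _MODALITY[start_sign]
--     is_odd = _is_odd_sign(start_sign)
--
--     if mod == 0:  # Movable
--         if is_odd:  # Aries (0) or Libra (6)
--             base = _PADANADHAMSHA_SEQUENCES["ODD_MOVABLE"]
--             # Rotate so start_sign is first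
--             idx = base.index(start_sign) if start_sign in base else 0
--             return base[idx:] + base[:idx]
--         else:  # Cancer (3) or Capricorn (9)
--             base = _PADANADHAMSHA_SEQUENCES["EVEN_MOVABLE"]
--             idx = base.index(start_sign) if start_sign in base else 0
--             return base[idx:] + base[:idx]
--
--     elif mod == 1:  # Fixed
--         if is_odd:  # Leo (4) or Aquarius (10)
--             if start_sign == 4:
--                 return _PADANADHAMSHA_SEQUENCES["ODD_FIXED_LEO"]
--             else:
--                 return _PADANADHAMSHA_SEQUENCES["ODD_FIXED_AQU"]
--         else:  # Taurus (1) or Scorpio (7)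
--             if start_sign == 1:
--                 return _PADANADHAMSHA_SEQUENCES["EVEN_FIXED_TAU"]
--             else:
--                 return _PADANADHAMSHA_SEQUENCES["EVEN_FIXED_SCO"]
--
--     else:  # Dual
--         if is_odd:  # Gemini (2) or Sagittarius (8)
--             if start_sign == 2:
--                 return _PADANADHAMSHA_SEQUENCES["ODD_DUAL_GEM"]
--             else:
--                 return _PADANADHAMSHA_SEQUENCES["ODD_DUAL_SAG"]
--         else:  # Virgo (5) or Pisces (11)
--             if start_sign == 5:
--                 return _PADANADHAMSHA_SEQUENCES["EVEN_DUAL_VIR"]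
--             else:
--                 return _PADANADHAMSHA_SEQUENCES["EVEN_DUAL_PIS"]
--
--     # Fallback: direct sequence
--     return [(start_sign + i) % 12 for i in range(12)]
-- ===== SOURCE B (Python) =====
-- def _rotated(base, s):
--     i = base.index(s)
--     return base[i:] + base[:i]
--
-- _TABLE = {
--     0: _rotated(list(range(12)), 0),
--     6: _rotated(list(range(12)), 6),
--     3: _rotated(list(range(11, -1, -1)), 3),
--     9: _rotated(list(range(11, -1, -1)), 9),
--     4: [4, 9, 2, 7, 0, 5, 10, 3, 8, 1, 6, 11],
--     10: [10, 3, 8, 1, 6, 11, 4, 9, 2, 7, 0, 5],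
--     1: [1, 8, 3, 10, 5, 0, 7, 2, 9, 4, 11, 6],
--     7: [7, 2, 9, 4, 11, 6, 1, 8, 3, 10, 5, 0],
--     2: [2, 6, 10, 3, 7, 11, 4, 8, 0, 5, 9, 1],
--     8: [8, 0, 4, 9, 1, 5, 10, 2, 6, 11, 3, 7],
--     5: [5, 1, 9, 4, 0, 8, 3, 11, 7, 2, 10, 6],
--     11: [11, 7, 3, 10, 6, 2, 9, 5, 1, 8, 4, 0],
-- }
--
-- def _get_padanadhamsha_sequence(start_sign: int):
--     """Return the 12-sign sequence for the given Padanadhamsha starting sign."""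
--     return _TABLE[start_sign]
-- ===== Notes on version B (the rewrite author's own statement) =====
-- stated objective: simpler
-- what changed: Replaced the modality/odd-sign branch tree with index/contains/slicing by one flat dict precomputed at module load mapping each start sign 0..11 directly to its full 12-element sequence; the body is a single table lookup.
import Mathlib
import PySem

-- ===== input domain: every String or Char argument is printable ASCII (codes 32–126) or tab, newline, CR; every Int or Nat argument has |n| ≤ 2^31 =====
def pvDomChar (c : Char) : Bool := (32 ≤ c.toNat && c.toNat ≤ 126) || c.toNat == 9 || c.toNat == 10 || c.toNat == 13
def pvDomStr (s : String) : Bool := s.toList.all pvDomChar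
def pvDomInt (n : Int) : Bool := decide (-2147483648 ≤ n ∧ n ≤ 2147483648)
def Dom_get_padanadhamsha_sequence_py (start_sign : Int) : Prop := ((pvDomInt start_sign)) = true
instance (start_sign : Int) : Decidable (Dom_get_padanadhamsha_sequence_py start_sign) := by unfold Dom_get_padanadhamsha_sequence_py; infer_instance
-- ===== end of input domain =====

-- B replaces A's modality/oddness decision tree with one flat 12-entry table mapped
-- directly from start_sign to its full sequence (objective: simpler).


-- ===== PORT A =====
def pyModality : PySem.Dict Int Int :=
  PySem.Dict.ofList [(0,0),(1,1),(2,2),(3,0),(4,1),(5,2),(6,0),(7,1),(8,2),(9,0),(10,1),(11,2)]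

def pyIsOddSign (sign : Int) : Bool := PySem.Int.mod sign 2 == 0

def pySequences : PySem.Dict String (List Int) :=
  PySem.Dict.ofList
    [ ("ODD_MOVABLE",  [0,1,2,3,4,5,6,7,8,9,10,11])
    , ("EVEN_MOVABLE", [11,10,9,8,7,6,5,4,3,2,1,0])
    , ("ODD_FIXED_LEO", [4, 9, 2, 7, 0, 5, 10, 3, 8, 1, 6, 11])
    , ("ODD_FIXED_AQU", [10, 3, 8, 1, 6, 11, 4, 9, 2, 7, 0, 5])
    , ("EVEN_FIXED_TAU", [1, 8, 3, 10, 5, 0, 7, 2, 9, 4, 11, 6])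
    , ("EVEN_FIXED_SCO", [7, 2, 9, 4, 11, 6, 1, 8, 3, 10, 5, 0])
    , ("ODD_DUAL_GEM", [2, 6, 10, 3, 7, 11, 4, 8, 0, 5, 9, 1])
    , ("ODD_DUAL_SAG", [8, 0, 4, 9, 1, 5, 10, 2, 6, 11, 3, 7])
    , ("EVEN_DUAL_VIR", [5, 1, 9, 4, 0, 8, 3, 11, 7, 2, 10, 6])
    , ("EVEN_DUAL_PIS", [11, 7, 3, 10, 6, 2, 9, 5, 1, 8, 4, 0]) ]

-- rotate helper inlined in A twice: base[idx:] + base[:idx] with idx = base.index(s) if s in base else 0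
def pyRotate (base : List Int) (start_sign : Int) : List Int :=
  let idx : Int := if base.contains start_sign then (PySem.List.index? base start_sign).getD 0 else 0
  PySem.List.slice base (some idx) none ++ PySem.List.slice base none (some idx)

def get_padanadhamsha_sequence_py (start_sign : Int) : List Int :=
  match pyModality.get? start_sign with
  | none => []   -- KeyError in Python; excluded by Pre_
  | some mod =>
    let is_odd := pyIsOddSign start_sign
    if mod == 0 then
      if is_odd then pyRotate (pySequences.getD "ODD_MOVABLE" []) start_sign
      else pyRotate (pySequences.getD "EVEN_MOVABLE" []) start_sign
    else if mod == 1 then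
      if is_odd then
        if start_sign == 4 then pySequences.getD "ODD_FIXED_LEO" []
        else pySequences.getD "ODD_FIXED_AQU" []
      else
        if start_sign == 1 then pySequences.getD "EVEN_FIXED_TAU" []
        else pySequences.getD "EVEN_FIXED_SCO" []
    else
      if is_odd then
        if start_sign == 2 then pySequences.getD "ODD_DUAL_GEM" []
        else pySequences.getD "ODD_DUAL_SAG" []
      else
        if start_sign == 5 then pySequences.getD "EVEN_DUAL_VIR" []
        else pySequences.getD "EVEN_DUAL_PIS" []

-- ===== PORT B =====
def altRotated (base : List Int) (s : Int) : List Int :=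
  let i : Int := (PySem.List.index? base s).getD 0
  PySem.List.slice base (some i) none ++ PySem.List.slice base none (some i)

def altTable : PySem.Dict Int (List Int) :=
  PySem.Dict.ofList
    [ (0, altRotated [0,1,2,3,4,5,6,7,8,9,10,11] 0)
    , (6, altRotated [0,1,2,3,4,5,6,7,8,9,10,11] 6)
    , (3, altRotated [11,10,9,8,7,6,5,4,3,2,1,0] 3)
    , (9, altRotated [11,10,9,8,7,6,5,4,3,2,1,0] 9)
    , (4, [4, 9, 2, 7, 0, 5, 10, 3, 8, 1, 6, 11])
    , (10, [10, 3, 8, 1, 6, 11, 4, 9, 2, 7, 0, 5])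
    , (1, [1, 8, 3, 10, 5, 0, 7, 2, 9, 4, 11, 6])
    , (7, [7, 2, 9, 4, 11, 6, 1, 8, 3, 10, 5, 0])
    , (2, [2, 6, 10, 3, 7, 11, 4, 8, 0, 5, 9, 1])
    , (8, [8, 0, 4, 9, 1, 5, 10, 2, 6, 11, 3, 7])
    , (5, [5, 1, 9, 4, 0, 8, 3, 11, 7, 2, 10, 6])
    , (11, [11, 7, 3, 10, 6, 2, 9, 5, 1, 8, 4, 0]) ]

def get_padanadhamsha_sequence_py_alt (start_sign : Int) : List Int :=
  match altTable.get? start_sign with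
  | some seq => seq
  | none => []   -- KeyError in Python; excluded by Pre_

-- ===== PRECONDITION & SPEC =====
-- Pre_ excludes start_sign outside 0..11, where Python A raises KeyError on _MODALITY[start_sign]
-- (and B's table lookup raises KeyError too).
def Pre_get_padanadhamsha_sequence_py (start_sign : Int) : Prop := -1 < start_sign ∧ start_sign < 12
instance (start_sign : Int) : Decidable (Pre_get_padanadhamsha_sequence_py start_sign) := by unfold Pre_get_padanadhamsha_sequence_py; infer_instance

def pvWitness_get_padanadhamsha_sequence_py : Int := 0

def Spec_get_padanadhamsha_sequence_py (start_sign : Int) (out : List Int) : Prop := out = get_padanadhamsha_sequence_py_alt start_sign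
instance (start_sign : Int) (out : List Int) : Decidable (Spec_get_padanadhamsha_sequence_py start_sign out) := by unfold Spec_get_padanadhamsha_sequence_py; infer_instance

-- ===== CLAIM (what is proved, stated in full; the proofs are below) =====
def Claim_equal_get_padanadhamsha_sequence_py : Prop := ∀ (start_sign : Int), Dom_get_padanadhamsha_sequence_py start_sign → Pre_get_padanadhamsha_sequence_py start_sign → Spec_get_padanadhamsha_sequence_py start_sign (get_padanadhamsha_sequence_py start_sign)

-- ===== LEMMAS AND PROOFS =====

-- ===== VERDICT (by name: the statement is the Claim_ definition above) =====
theorem get_padanadhamsha_sequence_py_spec : Claim_equal_get_padanadhamsha_sequence_py := by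
  intro s _ hpre
  unfold Spec_get_padanadhamsha_sequence_py
  obtain ⟨h0, h1⟩ := hpre
  interval_cases s <;> decide
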